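-- pv_equiv track=rewrite | github.com/JaraVictoria/SSL | todojunto_lexeryparser.py | automata_llaveAbrir
-- ===== SOURCE A (Python) =====
-- def automata_llaveAbrir(cadena):
-- 	estado = 0
-- 	estados_finales = [1]
--
-- 	for caracter in cadena:
-- 		if estado == 0 and caracter == "{":
-- 			estado = 1
-- 		else:
-- 			estado = -1
-- 			break
--
-- 	if estado == -1:
-- 		return ESTADO_TRAMPA
-- 	if estado in estados_finales:
-- 		return ESTADO_FINAL
-- 	else:
-- 		return ESTADO_NO_FINAL
--
-- ESTADO_FINAL = "ESTADO ACEPTADO"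
--
-- ESTADO_NO_FINAL = "ESTADO NO ACEPTADO"
--
-- ESTADO_TRAMPA = "ESTADO TRAMPA"
-- ===== SOURCE B (Python) =====
-- def automata_llaveAbrir(cadena):
-- 	# closed-form classification instead of a per-character automaton pass
-- 	if cadena == "{":
-- 		return ESTADO_FINAL
-- 	elif cadena == "":
-- 		return ESTADO_NO_FINAL
-- 	else:
-- 		return ESTADO_TRAMPA
--
-- ESTADO_FINAL = "ESTADO ACEPTADO"
--
-- ESTADO_NO_FINAL = "ESTADO NO ACEPTADO"
--
-- ESTADO_TRAMPA = "ESTADO TRAMPA"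
-- ===== Notes on version B (the rewrite author's own statement) =====
-- stated objective: simpler
-- what changed: Replaced the per-character automaton loop (state 0/1/-1 with break) by a direct closed-form classification of the whole string against "{" and "".
import Mathlib
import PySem

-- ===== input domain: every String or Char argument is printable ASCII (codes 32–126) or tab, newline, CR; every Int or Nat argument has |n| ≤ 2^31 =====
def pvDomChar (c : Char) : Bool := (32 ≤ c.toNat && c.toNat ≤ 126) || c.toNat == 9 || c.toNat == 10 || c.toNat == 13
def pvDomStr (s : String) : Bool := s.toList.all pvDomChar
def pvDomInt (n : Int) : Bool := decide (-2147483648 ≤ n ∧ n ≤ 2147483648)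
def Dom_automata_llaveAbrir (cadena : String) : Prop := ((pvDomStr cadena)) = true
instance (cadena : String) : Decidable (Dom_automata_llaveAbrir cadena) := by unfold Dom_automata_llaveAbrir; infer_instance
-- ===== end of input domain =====

-- B replaces A's per-character automaton loop with a direct closed-form string classification; objective: simpler.


-- ===== PORT A =====
-- the for-loop with break: processes characters, setting estado, stopping at the break
def automata_llaveAbrir_loop (estado : Int) (cs : List Char) : Int :=
  match cs with
  | [] => estado
  | c :: rest =>
      if estado == 0 && c == '{' then automata_llaveAbrir_loop 1 rest
      else -1   -- estado = -1; break

def automata_llaveAbrir (cadena : String) : String :=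
  let estados_finales : List Int := [1]
  let estado := automata_llaveAbrir_loop 0 cadena.toList
  if estado == -1 then "ESTADO TRAMPA"
  else if estado ∈ estados_finales then "ESTADO ACEPTADO"
  else "ESTADO NO ACEPTADO"

-- ===== PORT B =====
def automata_llaveAbrir_alt (cadena : String) : String :=
  if cadena == "{" then "ESTADO ACEPTADO"
  else if cadena == "" then "ESTADO NO ACEPTADO"
  else "ESTADO TRAMPA"

-- ===== PRECONDITION & SPEC =====
def Spec_automata_llaveAbrir (cadena : String) (out : String) : Prop := out = automata_llaveAbrir_alt cadena
instance (cadena : String) (out : String) : Decidable (Spec_automata_llaveAbrir cadena out) := by unfold Spec_automata_llaveAbrir; infer_instance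

-- ===== CLAIM (what is proved, stated in full; the proofs are below) =====
def Claim_equal_automata_llaveAbrir : Prop := ∀ (cadena : String), Dom_automata_llaveAbrir cadena → Spec_automata_llaveAbrir cadena (automata_llaveAbrir cadena)

-- ===== LEMMAS AND PROOFS =====

lemma string_eq_iff_toList (s t : String) : (s = t) ↔ s.toList = t.toList :=
  ⟨fun h => h ▸ rfl, fun h => String.ext (by simpa [String.toList] using h)⟩

lemma loop_from_one (cs : List Char) :
    automata_llaveAbrir_loop 1 cs = if cs = [] then 1 else -1 := by
  cases cs with
  | nil => simp [automata_llaveAbrir_loop]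
  | cons c rest => simp [automata_llaveAbrir_loop]

-- ===== VERDICT (by name: the statement is the Claim_ definition above) =====
theorem automata_llaveAbrir_spec : Claim_equal_automata_llaveAbrir := by
  intro cadena _
  unfold Spec_automata_llaveAbrir automata_llaveAbrir automata_llaveAbrir_alt
  simp only [beq_iff_eq, string_eq_iff_toList cadena "{", string_eq_iff_toList cadena ""]
  cases h : cadena.toList with
  | nil => simp [automata_llaveAbrir_loop]
  | cons c rest =>
      by_cases hc : c = '{'
      · subst hc
        simp only [automata_llaveAbrir_loop, beq_self_eq_true, Bool.and_self]
        rw [loop_from_one]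
        cases rest with
        | nil => simp
        | cons d ds => simp
      · simp [automata_llaveAbrir_loop, hc]
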